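-- pv_equiv track=rewrite | github.com/pawgajda/codewars-solutions | python/diamonds_and_toads.py | diamonds_and_toads
-- ===== SOURCE A (Python) =====
-- def diamonds_and_toads(sentence, fairy):
--     if fairy == "good":
--         result = {"ruby": 0, "crystal": 0}
--
--         for c in sentence:
--             match c:
--                 case "r": result["ruby"] += 1
--                 case "R": result["ruby"] += 2
--                 case "c": result["crystal"] += 1
--                 case "C": result["crystal"] += 2
--
--     if fairy == "evil":
--         result = {"python": 0, "squirrel": 0}
--
--         for c in sentence:
--             match c:
--                 case "p": result["python"] += 1
--                 case "P": result["python"] += 2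
--                 case "s": result["squirrel"] += 1
--                 case "S": result["squirrel"] += 2
--
--     return result
-- ===== SOURCE B (Python) =====
-- def diamonds_and_toads(sentence, fairy):
--     if fairy == "good":
--         result = {"ruby": sentence.count("r") + 2 * sentence.count("R"),
--                   "crystal": sentence.count("c") + 2 * sentence.count("C")}
--     if fairy == "evil":
--         result = {"python": sentence.count("p") + 2 * sentence.count("P"),
--                   "squirrel": sentence.count("s") + 2 * sentence.count("S")}
--     return result
-- ===== Notes on version B (the rewrite author's own statement) =====
-- stated objective: simpler
-- what changed: Replaces the per-character match/accumulate loop over a mutable dict with direct arithmetic over str.count totals, building each result dict in one expression.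
import Mathlib
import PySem

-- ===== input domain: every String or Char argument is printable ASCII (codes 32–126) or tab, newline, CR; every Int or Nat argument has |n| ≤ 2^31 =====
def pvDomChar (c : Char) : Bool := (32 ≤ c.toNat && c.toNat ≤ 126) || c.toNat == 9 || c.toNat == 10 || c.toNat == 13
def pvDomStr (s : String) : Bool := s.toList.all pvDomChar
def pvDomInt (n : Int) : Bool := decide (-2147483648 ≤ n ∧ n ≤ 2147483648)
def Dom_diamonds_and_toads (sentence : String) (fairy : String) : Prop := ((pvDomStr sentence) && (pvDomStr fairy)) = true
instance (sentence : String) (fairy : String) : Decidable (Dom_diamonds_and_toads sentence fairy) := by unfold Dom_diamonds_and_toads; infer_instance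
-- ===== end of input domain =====

-- B replaces A's per-character match/accumulate loop over a mutable dict with direct
-- arithmetic over str.count totals (objective: simpler).

-- ===== PORT A =====
-- one iteration of A's 'for c in sentence' loop in the good branch
-- (result["ruby"] += 1 reads an existing key, so Dict.modify with default 0 is exact here)
def pvGoodStep (d : PySem.Dict String Int) (c : Char) : PySem.Dict String Int :=
  if c = 'r' then d.modify "ruby" 0 (· + 1)
  else if c = 'R' then d.modify "ruby" 0 (· + 2)
  else if c = 'c' then d.modify "crystal" 0 (· + 1)
  else if c = 'C' then d.modify "crystal" 0 (· + 2)
  else d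

-- one iteration of A's loop in the evil branch
def pvEvilStep (d : PySem.Dict String Int) (c : Char) : PySem.Dict String Int :=
  if c = 'p' then d.modify "python" 0 (· + 1)
  else if c = 'P' then d.modify "python" 0 (· + 2)
  else if c = 's' then d.modify "squirrel" 0 (· + 1)
  else if c = 'S' then d.modify "squirrel" 0 (· + 2)
  else d

def diamonds_and_toads (sentence : String) (fairy : String) : List (String × Int) :=
  if fairy = "good" then
    (sentence.toList.foldl pvGoodStep (PySem.Dict.ofList [("ruby", 0), ("crystal", 0)])).items
  else if fairy = "evil" then
    (sentence.toList.foldl pvEvilStep (PySem.Dict.ofList [("python", 0), ("squirrel", 0)])).items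
  else []  -- Python raises UnboundLocalError here; excluded by Pre_

-- ===== PORT B =====
def diamonds_and_toads_alt (sentence : String) (fairy : String) : List (String × Int) :=
  if fairy = "good" then
    [("ruby", (PySem.Str.count sentence "r" : Int) + 2 * (PySem.Str.count sentence "R" : Int)),
     ("crystal", (PySem.Str.count sentence "c" : Int) + 2 * (PySem.Str.count sentence "C" : Int))]
  else if fairy = "evil" then
    [("python", (PySem.Str.count sentence "p" : Int) + 2 * (PySem.Str.count sentence "P" : Int)),
     ("squirrel", (PySem.Str.count sentence "s" : Int) + 2 * (PySem.Str.count sentence "S" : Int))]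
  else []  -- Python raises UnboundLocalError here; excluded by Pre_

-- ===== PRECONDITION & SPEC =====
-- Pre_ excludes exactly the fairies other than "good"/"evil", on which A raises UnboundLocalError.
def Pre_diamonds_and_toads (sentence : String) (fairy : String) : Prop :=
  fairy = "good" ∨ fairy = "evil"
instance (sentence : String) (fairy : String) : Decidable (Pre_diamonds_and_toads sentence fairy) := by
  unfold Pre_diamonds_and_toads; infer_instance

def pvWitness_diamonds_and_toads : String × String := ("Ruby and crystal", "good")

def Spec_diamonds_and_toads (sentence : String) (fairy : String) (out : List (String × Int)) : Prop := out = diamonds_and_toads_alt sentence fairy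
instance (sentence : String) (fairy : String) (out : List (String × Int)) : Decidable (Spec_diamonds_and_toads sentence fairy out) := by unfold Spec_diamonds_and_toads; infer_instance

-- ===== CLAIM (what is proved, stated in full; the proofs are below) =====
def Claim_equal_diamonds_and_toads : Prop := ∀ (sentence : String) (fairy : String), Dom_diamonds_and_toads sentence fairy → Pre_diamonds_and_toads sentence fairy → Spec_diamonds_and_toads sentence fairy (diamonds_and_toads sentence fairy)

-- ===== LEMMAS AND PROOFS =====

-- single-character substring count is the character count
lemma count_go_single (c : Char) : ∀ (fuel : Nat) (l : List Char) (acc : Nat),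
    l.length ≤ fuel → PySem.Chars.count.go [c] fuel l acc = acc + l.count c := by
  intro fuel
  induction fuel with
  | zero =>
    intro l acc h
    cases l with
    | nil => simp [PySem.Chars.count.go]
    | cons x t => simp at h
  | succ n ih =>
    intro l acc h
    cases l with
    | nil => simp [PySem.Chars.count.go]
    | cons x t =>
      by_cases hx : c = x
      · subst hx
        simp only [PySem.Chars.count.go]
        rw [if_pos (by simp [List.isPrefixOf])]
        rw [List.length_singleton, List.drop_one, List.tail_cons]
        rw [ih t (acc + 1) (by simp at h; omega)]
        simp [List.count_cons]
        omega
      · simp only [PySem.Chars.count.go]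
        rw [if_neg (by simp [List.isPrefixOf, hx])]
        rw [ih t acc (by simp at h; omega)]
        simp [List.count_cons, Ne.symm hx]

lemma count_single (s : List Char) (c : Char) : PySem.Chars.count s [c] = s.count c := by
  simp [PySem.Chars.count, count_go_single c s.length s 0 le_rfl]

lemma good_loop (cs : List Char) (r k : Int) :
    cs.foldl pvGoodStep (PySem.Dict.mk [("ruby", r), ("crystal", k)]) =
      PySem.Dict.mk [("ruby", r + cs.count 'r' + 2 * cs.count 'R'),
                     ("crystal", k + cs.count 'c' + 2 * cs.count 'C')] := by
  induction cs generalizing r k with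
  | nil => simp
  | cons ch tl ih =>
    rw [List.foldl_cons]
    by_cases h1 : ch = 'r'
    · rw [show pvGoodStep (PySem.Dict.mk [("ruby", r), ("crystal", k)]) ch =
          PySem.Dict.mk [("ruby", r + 1), ("crystal", k)] by
        simp [pvGoodStep, h1]; rfl]
      rw [ih]
      simp [h1, List.count_cons]
      omega
    · by_cases h2 : ch = 'R'
      · rw [show pvGoodStep (PySem.Dict.mk [("ruby", r), ("crystal", k)]) ch =
            PySem.Dict.mk [("ruby", r + 2), ("crystal", k)] by
          simp [pvGoodStep, h1, h2]; rfl]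
        rw [ih]
        simp [h1, h2, List.count_cons]
        omega
      · by_cases h3 : ch = 'c'
        · rw [show pvGoodStep (PySem.Dict.mk [("ruby", r), ("crystal", k)]) ch =
              PySem.Dict.mk [("ruby", r), ("crystal", k + 1)] by
            simp [pvGoodStep, h1, h2, h3]; rfl]
          rw [ih]
          simp [h1, h2, h3, List.count_cons]
          omega
        · by_cases h4 : ch = 'C'
          · rw [show pvGoodStep (PySem.Dict.mk [("ruby", r), ("crystal", k)]) ch =
                PySem.Dict.mk [("ruby", r), ("crystal", k + 2)] by
              simp [pvGoodStep, h1, h2, h3, h4]; rfl]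
            rw [ih]
            simp [h1, h2, h3, h4, List.count_cons]
            omega
          · rw [show pvGoodStep (PySem.Dict.mk [("ruby", r), ("crystal", k)]) ch =
                PySem.Dict.mk [("ruby", r), ("crystal", k)] by
              simp [pvGoodStep, h1, h2, h3, h4]]
            rw [ih]
            simp [List.count_cons, h1, h2, h3, h4, Ne.symm]

lemma evil_loop (cs : List Char) (r k : Int) :
    cs.foldl pvEvilStep (PySem.Dict.mk [("python", r), ("squirrel", k)]) =
      PySem.Dict.mk [("python", r + cs.count 'p' + 2 * cs.count 'P'),
                     ("squirrel", k + cs.count 's' + 2 * cs.count 'S')] := by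
  induction cs generalizing r k with
  | nil => simp
  | cons ch tl ih =>
    rw [List.foldl_cons]
    by_cases h1 : ch = 'p'
    · rw [show pvEvilStep (PySem.Dict.mk [("python", r), ("squirrel", k)]) ch =
          PySem.Dict.mk [("python", r + 1), ("squirrel", k)] by
        simp [pvEvilStep, h1]; rfl]
      rw [ih]
      simp [h1, List.count_cons]
      omega
    · by_cases h2 : ch = 'P'
      · rw [show pvEvilStep (PySem.Dict.mk [("python", r), ("squirrel", k)]) ch =
            PySem.Dict.mk [("python", r + 2), ("squirrel", k)] by
          simp [pvEvilStep, h1, h2]; rfl]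
        rw [ih]
        simp [h1, h2, List.count_cons]
        omega
      · by_cases h3 : ch = 's'
        · rw [show pvEvilStep (PySem.Dict.mk [("python", r), ("squirrel", k)]) ch =
              PySem.Dict.mk [("python", r), ("squirrel", k + 1)] by
            simp [pvEvilStep, h1, h2, h3]; rfl]
          rw [ih]
          simp [h1, h2, h3, List.count_cons]
          omega
        · by_cases h4 : ch = 'S'
          · rw [show pvEvilStep (PySem.Dict.mk [("python", r), ("squirrel", k)]) ch =
                PySem.Dict.mk [("python", r), ("squirrel", k + 2)] by
              simp [pvEvilStep, h1, h2, h3, h4]; rfl]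
            rw [ih]
            simp [h1, h2, h3, h4, List.count_cons]
            omega
          · rw [show pvEvilStep (PySem.Dict.mk [("python", r), ("squirrel", k)]) ch =
                PySem.Dict.mk [("python", r), ("squirrel", k)] by
              simp [pvEvilStep, h1, h2, h3, h4]]
            rw [ih]
            simp [List.count_cons, h1, h2, h3, h4, Ne.symm]

-- ===== VERDICT (by name: the statement is the Claim_ definition above) =====
theorem diamonds_and_toads_spec : Claim_equal_diamonds_and_toads := by
  intro sentence fairy _ hpre
  unfold Spec_diamonds_and_toads diamonds_and_toads diamonds_and_toads_alt
  rcases hpre with h | h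
  · subst h
    simp only [if_pos rfl]
    rw [show (PySem.Dict.ofList [("ruby", (0:Int)), ("crystal", 0)]) =
        PySem.Dict.mk [("ruby", 0), ("crystal", 0)] from rfl]
    rw [good_loop]
    simp [PySem.Str.count, count_single]
  · subst h
    simp only [reduceIte]
    rw [show (PySem.Dict.ofList [("python", (0:Int)), ("squirrel", 0)]) =
        PySem.Dict.mk [("python", 0), ("squirrel", 0)] from rfl]
    rw [evil_loop]
    simp [PySem.Str.count, count_single]
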